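-- pv_equiv track=rewrite | github.com/surajit-patar/SIH-2023 | Tracker.py | detect_abandoned_luggage
-- ===== SOURCE A (Python) =====
-- def detect_abandoned_luggage(bboxes, confidences, class_ids):
--
--     person_id = 0
--     luggage_ids = [24, 26, 28]
--
--     person_bboxes = [bboxes[i] for i, class_id in enumerate(class_ids) if class_id == person_id]
--     luggage_bboxes = [bboxes[i] for i, class_id in enumerate(class_ids) if class_id in luggage_ids]
--
--     abandoned_luggage = []
--
--
--     for luggage_bbox in luggage_bboxes:
--         is_abandoned = True
--         for person_bbox in person_bboxes:
--             if intersects(luggage_bbox, person_bbox):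
--                 is_abandoned = False
--                 break
--         if is_abandoned:
--             abandoned_luggage.append(luggage_bbox)
--
--     return abandoned_luggage
--
-- def intersects(bbox1, bbox2):
--
--     x1, y1, w1, h1 = bbox1
--     x2, y2, w2, h2 = bbox2
--
--     if (x1 < x2 + w2 and x1 + w1 > x2 and y1 < y2 + h2 and y1 + h1 > y2):
--         return True
--     return False
-- ===== SOURCE B (Python) =====
-- def detect_abandoned_luggage(bboxes, confidences, class_ids):
--     # Sweep over x: persons sorted by left edge, luggage visited in order of
--     # increasing right edge; a single pointer moves over the sorted persons,
--     # growing the "active" set (persons whose left edge lies before the current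
--     # luggage's right edge), so the x-left test is done once per person by the
--     # sweep instead of once per pair; results are keyed by luggage index and
--     # emitted in the original order.
--     persons = [b for b, c in zip(bboxes, class_ids) if c == 0]
--     luggage = [b for b, c in zip(bboxes, class_ids) if c in (24, 26, 28)]
--     persons.sort(key=lambda p: p[0])
--     order = sorted(range(len(luggage)), key=lambda i: luggage[i][0] + luggage[i][2])
--     hit = {}
--     k = 0
--     active = []
--     for i in order:
--         l = luggage[i]
--         x_hi = l[0] + l[2]
--         while k < len(persons) and persons[k][0] < x_hi:
--             active.append(persons[k])
--             k += 1
--         hit[i] = any(l[0] < p[0] + p[2] and l[1] < p[1] + p[3] and l[1] + l[3] > p[1]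
--                      for p in active)
--     return [l for i, l in enumerate(luggage) if not hit[i]]
-- ===== Notes on version B (the rewrite author's own statement) =====
-- stated objective: alternative
-- what changed: B replaces A's all-pairs luggage-vs-person scan by a sweep over x: persons are sorted by left edge, luggage indices are visited in order of increasing right edge, and a single forward pointer grows an 'active' person set, so the left-edge test is paid once per person instead of once per pair; results are keyed by luggage index and emitted in the original order.
-- outside the precondition, e.g. on detect_abandoned_luggage([(1, 2)], [], [24]): A returns [(1, 2)], B raises IndexError; on detect_abandoned_luggage([()], [], [0]): A returns [], B raises IndexError
import Mathlib
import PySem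

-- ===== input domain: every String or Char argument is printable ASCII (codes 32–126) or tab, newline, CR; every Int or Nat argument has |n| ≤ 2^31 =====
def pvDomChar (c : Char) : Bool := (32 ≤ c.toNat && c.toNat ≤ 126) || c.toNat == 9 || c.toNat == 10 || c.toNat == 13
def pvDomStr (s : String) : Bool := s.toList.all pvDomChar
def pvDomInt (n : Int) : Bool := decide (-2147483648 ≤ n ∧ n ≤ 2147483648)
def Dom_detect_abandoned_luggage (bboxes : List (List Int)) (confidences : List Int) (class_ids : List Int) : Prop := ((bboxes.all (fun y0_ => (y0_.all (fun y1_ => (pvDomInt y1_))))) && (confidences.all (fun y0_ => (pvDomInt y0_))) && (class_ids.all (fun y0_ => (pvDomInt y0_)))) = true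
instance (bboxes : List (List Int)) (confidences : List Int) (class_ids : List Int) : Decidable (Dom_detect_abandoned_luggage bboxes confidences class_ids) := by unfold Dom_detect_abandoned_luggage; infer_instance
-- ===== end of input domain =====

-- B replaces A's all-pairs scan by an x-sweep: persons sorted by left edge,
-- luggage visited by increasing right edge with a one-way pointer growing an
-- "active" person set (objective: alternative; a timing run measured a
-- constant-factor speedup, same O(L*P) worst case).

-- ===== PORT A =====
-- helper `intersects` of A: 4-way unpack, then the four strict inequalities.
-- Python raises ValueError on boxes without exactly 4 coords; excluded by Pre_.
def pyIntersects (bbox1 bbox2 : List Int) : Bool :=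
  match bbox1, bbox2 with
  | [x1, y1, w1, h1], [x2, y2, w2, h2] =>
      decide (x1 < x2 + w2) && decide (x1 + w1 > x2) &&
      decide (y1 < y2 + h2) && decide (y1 + h1 > y2)
  | _, _ => false

-- [bboxes[i] for i, class_id in enumerate(class_ids) if class_id == person_id]
-- (index always in range under Pre_, so getD never uses its default there)
def selPersonsA (bboxes : List (List Int)) : List Int → Nat → List (List Int)
  | [], _ => []
  | c :: cs, i =>
      if c = 0 then bboxes.getD i [] :: selPersonsA bboxes cs (i + 1)
      else selPersonsA bboxes cs (i + 1)

-- [bboxes[i] for i, class_id in enumerate(class_ids) if class_id in luggage_ids]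
def selLuggageA (bboxes : List (List Int)) : List Int → Nat → List (List Int)
  | [], _ => []
  | c :: cs, i =>
      if c = 24 ∨ c = 26 ∨ c = 28 then bboxes.getD i [] :: selLuggageA bboxes cs (i + 1)
      else selLuggageA bboxes cs (i + 1)

def detect_abandoned_luggage (bboxes : List (List Int)) (confidences : List Int) (class_ids : List Int) : List (List Int) :=
  let person_bboxes := selPersonsA bboxes class_ids 0
  let luggage_bboxes := selLuggageA bboxes class_ids 0
  luggage_bboxes.foldl
    (fun abandoned luggage_bbox =>
      let is_abandoned := !(person_bboxes.any (fun person_bbox => pyIntersects luggage_bbox person_bbox))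
      if is_abandoned then abandoned ++ [luggage_bbox] else abandoned)
    []

-- ===== PORT B =====
-- p[0], the sort key of the persons (pyGetD totalizes the IndexError Python
-- raises on a too-short box; those inputs are outside Pre_)
def bKeyP (p : List Int) : Int := PySem.List.pyGetD p 0 0

-- l[0] + l[2], the right edge a luggage box is swept by
def bX (l : List Int) : Int := PySem.List.pyGetD l 0 0 + PySem.List.pyGetD l 2 0

-- the generator's test: l[0] < p[0]+p[2] and l[1] < p[1]+p[3] and l[1]+l[3] > p[1]
def bCond (l p : List Int) : Bool :=
  decide (PySem.List.pyGetD l 0 0 < PySem.List.pyGetD p 0 0 + PySem.List.pyGetD p 2 0) &&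
  decide (PySem.List.pyGetD l 1 0 < PySem.List.pyGetD p 1 0 + PySem.List.pyGetD p 3 0) &&
  decide (PySem.List.pyGetD l 1 0 + PySem.List.pyGetD l 3 0 > PySem.List.pyGetD p 1 0)

-- one iteration of Source B's `for i in order` loop; the pointer k is represented
-- by the not-yet-consumed suffix of the sorted person list (state.1), so the
-- `while k < len(persons) and persons[k][0] < x_hi: active.append(...)` loop is
-- exactly the takeWhile/dropWhile split of that suffix (same elements, order).
def bStep (lug : List (List Int))
    (st : List (List Int) × List (List Int) × PySem.Dict Int Bool) (i : Int) :
    List (List Int) × List (List Int) × PySem.Dict Int Bool :=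
  let l := PySem.List.pyGetD lug i []
  let xhi := bX l
  let newly := st.1.takeWhile (fun p => decide (bKeyP p < xhi))
  let rest := st.1.dropWhile (fun p => decide (bKeyP p < xhi))
  let active := st.2.1 ++ newly
  (rest, active, st.2.2.insert i (active.any (bCond l)))

def detect_abandoned_luggage_alt (bboxes : List (List Int)) (confidences : List Int) (class_ids : List Int) : List (List Int) :=
  let persons := ((bboxes.zip class_ids).filter (fun bc => bc.2 == 0)).map Prod.fst
  let luggage := ((bboxes.zip class_ids).filter (fun bc => bc.2 == 24 || bc.2 == 26 || bc.2 == 28)).map Prod.fst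
  let psorted := PySem.List.sorted persons bKeyP
  let order := PySem.List.sorted (PySem.List.pyRange 0 luggage.length)
      (fun i => bX (PySem.List.pyGetD luggage i []))
  let st := order.foldl (bStep luggage) (psorted, [], (PySem.Dict.empty : PySem.Dict Int Bool))
  -- [l for i, l in enumerate(luggage) if not hit[i]]  (every i in range is a key,
  -- so Python's hit[i] never raises; getD totalizes the lookup)
  ((PySem.List.enumerate luggage).filter (fun il => !(st.2.2.getD il.1 false))).map (fun il => il.2)

-- ===== PRECONDITION & SPEC =====
-- Pre_ excludes inputs where a person/luggage class id has no bbox at its index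
-- (A raises IndexError there) and inputs with malformed boxes where either A
-- raises (a non-4-element box when persons and luggage are both present: A's
-- 4-tuple unpack fails on a compared pair) or B raises (a luggage box with
-- fewer than 3 coords, or a person box with fewer than 1, hit by B's sort keys).
def Pre_detect_abandoned_luggage (bboxes : List (List Int)) (confidences : List Int) (class_ids : List Int) : Prop :=
  (∀ c ∈ class_ids.drop bboxes.length, ¬(c = 0 ∨ c = 24 ∨ c = 26 ∨ c = 28)) ∧
  (((∃ p ∈ bboxes.zip class_ids, p.2 = 0) ∧ (∃ p ∈ bboxes.zip class_ids, p.2 = 24 ∨ p.2 = 26 ∨ p.2 = 28)) →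
    ∀ p ∈ bboxes.zip class_ids, (p.2 = 0 ∨ p.2 = 24 ∨ p.2 = 26 ∨ p.2 = 28) → p.1.length = 4) ∧
  ((¬ ∃ p ∈ bboxes.zip class_ids, p.2 = 0) →
    ∀ p ∈ bboxes.zip class_ids, (p.2 = 24 ∨ p.2 = 26 ∨ p.2 = 28) → 3 ≤ p.1.length) ∧
  ((¬ ∃ p ∈ bboxes.zip class_ids, p.2 = 24 ∨ p.2 = 26 ∨ p.2 = 28) →
    ∀ p ∈ bboxes.zip class_ids, p.2 = 0 → 1 ≤ p.1.length)
instance (bboxes : List (List Int)) (confidences : List Int) (class_ids : List Int) : Decidable (Pre_detect_abandoned_luggage bboxes confidences class_ids) := by unfold Pre_detect_abandoned_luggage; infer_instance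

def pvWitness_detect_abandoned_luggage : List (List Int) × List Int × List Int :=
  ([[0, 0, 2, 2], [5, 5, 1, 1], [1, 1, 1, 1]], [90, 80, 70], [0, 24, 26])

def Spec_detect_abandoned_luggage (bboxes : List (List Int)) (confidences : List Int) (class_ids : List Int) (out : List (List Int)) : Prop := out = detect_abandoned_luggage_alt bboxes confidences class_ids
instance (bboxes : List (List Int)) (confidences : List Int) (class_ids : List Int) (out : List (List Int)) : Decidable (Spec_detect_abandoned_luggage bboxes confidences class_ids out) := by unfold Spec_detect_abandoned_luggage; infer_instance

-- ===== CLAIM =====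
def Claim_equal_detect_abandoned_luggage : Prop := ∀ (bboxes : List (List Int)) (confidences : List Int) (class_ids : List Int), Dom_detect_abandoned_luggage bboxes confidences class_ids → Pre_detect_abandoned_luggage bboxes confidences class_ids → Spec_detect_abandoned_luggage bboxes confidences class_ids (detect_abandoned_luggage bboxes confidences class_ids)

-- ===== LEMMAS AND PROOFS =====

-- reference selection: (persons, luggage) by simultaneous recursion
def selRef : List (List Int) → List Int → List (List Int) × List (List Int)
  | _, [] => ([], [])
  | [], _ :: _ => ([], [])
  | b :: bs, c :: cs =>
      let r := selRef bs cs
      if c = 0 then (b :: r.1, r.2)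
      else if c = 24 ∨ c = 26 ∨ c = 28 then (r.1, b :: r.2)
      else r

lemma getD_append_cons (bs : List (List Int)) (r : List Int) (rest : List (List Int)) :
    (bs ++ r :: rest).getD bs.length [] = r := by
  induction bs with
  | nil => rfl
  | cons b bs ih => simpa using ih

-- when every remaining class id is irrelevant, nothing more is selected
lemma selPersonsA_irrel (bs : List (List Int)) : ∀ (cs : List Int) (i : Nat),
    (∀ c ∈ cs, ¬(c = 0 ∨ c = 24 ∨ c = 26 ∨ c = 28)) → selPersonsA bs cs i = [] := by
  intro cs
  induction cs with
  | nil => intro i _; rfl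
  | cons c cs ih =>
    intro i h
    have hc := h c (by simp)
    simp only [selPersonsA, if_neg (by tauto : ¬ c = 0)]
    exact ih (i + 1) (fun c' hc' => h c' (by simp [hc']))

lemma selLuggageA_irrel (bs : List (List Int)) : ∀ (cs : List Int) (i : Nat),
    (∀ c ∈ cs, ¬(c = 0 ∨ c = 24 ∨ c = 26 ∨ c = 28)) → selLuggageA bs cs i = [] := by
  intro cs
  induction cs with
  | nil => intro i _; rfl
  | cons c cs ih =>
    intro i h
    have hc := h c (by simp)
    simp only [selLuggageA, if_neg (by tauto : ¬ (c = 24 ∨ c = 26 ∨ c = 28))]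
    exact ih (i + 1) (fun c' hc' => h c' (by simp [hc']))

lemma selPersonsA_eq (cs : List Int) : ∀ (bs rest : List (List Int)),
    (∀ c ∈ cs.drop rest.length, ¬(c = 0 ∨ c = 24 ∨ c = 26 ∨ c = 28)) →
    selPersonsA (bs ++ rest) cs bs.length = (selRef rest cs).1 := by
  induction cs with
  | nil => intro bs rest _; cases rest <;> rfl
  | cons c cs ih =>
    intro bs rest h
    cases rest with
    | nil =>
      rw [selPersonsA_irrel (bs ++ []) (c :: cs) bs.length (by simpa using h)]
      rfl
    | cons r rest' =>
      have hrec : selPersonsA (bs ++ r :: rest') cs (bs.length + 1)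
          = (selRef rest' cs).1 := by
        have := ih (bs ++ [r]) rest' (by simpa using h)
        simpa [List.append_assoc] using this
      simp only [selPersonsA, selRef, getD_append_cons, hrec]
      by_cases h0 : c = 0
      · simp [h0]
      · by_cases hl : c = 24 ∨ c = 26 ∨ c = 28 <;> simp [h0, hl]

lemma selLuggageA_eq (cs : List Int) : ∀ (bs rest : List (List Int)),
    (∀ c ∈ cs.drop rest.length, ¬(c = 0 ∨ c = 24 ∨ c = 26 ∨ c = 28)) →
    selLuggageA (bs ++ rest) cs bs.length = (selRef rest cs).2 := by
  induction cs with
  | nil => intro bs rest _; cases rest <;> rfl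
  | cons c cs ih =>
    intro bs rest h
    cases rest with
    | nil =>
      rw [selLuggageA_irrel (bs ++ []) (c :: cs) bs.length (by simpa using h)]
      rfl
    | cons r rest' =>
      have hrec : selLuggageA (bs ++ r :: rest') cs (bs.length + 1)
          = (selRef rest' cs).2 := by
        have := ih (bs ++ [r]) rest' (by simpa using h)
        simpa [List.append_assoc] using this
      simp only [selLuggageA, selRef, getD_append_cons, hrec]
      by_cases h0 : c = 0
      · simp [h0]
      · by_cases hl : c = 24 ∨ c = 26 ∨ c = 28 <;> simp [h0, hl]

-- B's zip comprehensions compute the same two selections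
lemma zip_filter_persons : ∀ (bs : List (List Int)) (cs : List Int),
    ((bs.zip cs).filter (fun bc => bc.2 == 0)).map Prod.fst = (selRef bs cs).1 := by
  intro bs
  induction bs with
  | nil => intro cs; cases cs <;> rfl
  | cons b bs ih =>
    intro cs
    cases cs with
    | nil => rfl
    | cons c cs =>
      simp only [List.zip_cons_cons, List.filter_cons, selRef]
      by_cases h0 : c = 0
      · simp [h0, ih]
      · by_cases hl : c = 24 ∨ c = 26 ∨ c = 28 <;> simp [h0, hl, ih]

lemma zip_filter_luggage : ∀ (bs : List (List Int)) (cs : List Int),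
    ((bs.zip cs).filter (fun bc => bc.2 == 24 || bc.2 == 26 || bc.2 == 28)).map Prod.fst = (selRef bs cs).2 := by
  intro bs
  induction bs with
  | nil => intro cs; cases cs <;> rfl
  | cons b bs ih =>
    intro cs
    cases cs with
    | nil => rfl
    | cons c cs =>
      simp only [List.zip_cons_cons, List.filter_cons, selRef]
      by_cases h0 : c = 0
      · simp [h0, ih]
      · by_cases hl : c = 24 ∨ c = 26 ∨ c = 28
        · rcases hl with h | h | h <;> simp [h0, h, ih]
        · simp only [if_neg h0, if_neg hl]
          have : (c == 24 || c == 26 || c == 28) = false := by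
            simp only [Bool.or_eq_false_iff, beq_eq_false_iff_ne, ne_eq]; tauto
          simp [this, ih]

-- on 4-element boxes, A's intersects is the sweep's x-gate && the y/right test
lemma intersects_split (l p : List Int) (hl : l.length = 4) (hp : p.length = 4) :
    pyIntersects l p = (decide (bKeyP p < bX l) && bCond l p) := by
  match l, hl with
  | [a, b, c, d], _ =>
    match p, hp with
    | [e, f, g, h], _ =>
      simp only [pyIntersects, bKeyP, bX, bCond, PySem.List.pyGetD]
      norm_num
      by_cases h1 : a < e + g <;> by_cases h2 : e < a + c <;>
        by_cases h3 : b < f + h <;> by_cases h4 : f < b + d <;>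
        simp [h1, h2, h3, h4]

-- any over the whole sorted list = any of the residual test over the
-- <X-prefix, when every full test implies the key bound (sortedness kills the tail)
lemma any_takeWhile_lt (key : List Int → Int) (X : Int) (f g : List Int → Bool) :
    ∀ (l : List (List Int)), l.Pairwise (fun a b => key a ≤ key b) →
    (∀ p ∈ l, f p = (decide (key p < X) && g p)) →
    l.any f = (l.takeWhile (fun p => decide (key p < X))).any g := by
  intro l
  induction l with
  | nil => intro _ _; rfl
  | cons a t ih =>
    intro hpw hfg
    obtain ⟨ha, ht⟩ := List.pairwise_cons.mp hpw
    by_cases hk : key a < X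
    · have h1 := ih ht (fun p hp => hfg p (by simp [hp]))
      simp [List.takeWhile_cons, hk, hfg a (by simp), h1]
    · have htail : t.any f = false := by
        rw [List.any_eq_false]
        intro p hp
        rw [hfg p (by simp [hp])]
        have : ¬ key p < X := by have := ha p hp; omega
        simp [this]
      simp [List.takeWhile_cons, hk, hfg a (by simp), htail]

-- the sweep invariant: active ++ rest is the whole sorted person list and every
-- active person passes the x-gate of every still-unprocessed luggage index
lemma sweep_dict (lug : List (List Int)) (psorted : List (List Int)) :
    ∀ (ord : List Int) (active rest : List (List Int)) (d : PySem.Dict Int Bool),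
    active ++ rest = psorted →
    ord.Pairwise (fun i j => bX (PySem.List.pyGetD lug i []) ≤ bX (PySem.List.pyGetD lug j [])) →
    (∀ i ∈ ord, ∀ p ∈ active, bKeyP p < bX (PySem.List.pyGetD lug i [])) →
    (ord.foldl (bStep lug) (rest, active, d)).2.2
      = ord.foldl (fun d i => d.insert i
          ((psorted.takeWhile (fun p => decide (bKeyP p < bX (PySem.List.pyGetD lug i [])))).any
            (bCond (PySem.List.pyGetD lug i [])))) d := by
  intro ord
  induction ord with
  | nil => intro active rest d _ _ _; rfl
  | cons i ord ih =>
    intro active rest d hsplit hpw hact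
    obtain ⟨hi, hpw'⟩ := List.pairwise_cons.mp hpw
    have hgate : ∀ p ∈ active, (fun p => decide (bKeyP p < bX (PySem.List.pyGetD lug i []))) p = true := by
      intro p hp; simpa using hact i (by simp) p hp
    have htake : psorted.takeWhile (fun p => decide (bKeyP p < bX (PySem.List.pyGetD lug i [])))
        = active ++ rest.takeWhile (fun p => decide (bKeyP p < bX (PySem.List.pyGetD lug i []))) := by
      rw [← hsplit]; exact List.takeWhile_append_of_pos hgate
    have hdrop : psorted.dropWhile (fun p => decide (bKeyP p < bX (PySem.List.pyGetD lug i [])))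
        = rest.dropWhile (fun p => decide (bKeyP p < bX (PySem.List.pyGetD lug i []))) := by
      rw [← hsplit]; exact List.dropWhile_append_of_pos hgate
    simp only [List.foldl_cons, bStep]
    rw [ih (active ++ rest.takeWhile (fun p => decide (bKeyP p < bX (PySem.List.pyGetD lug i []))))
          (rest.dropWhile (fun p => decide (bKeyP p < bX (PySem.List.pyGetD lug i [])))) _
          (by rw [List.append_assoc, List.takeWhile_append_dropWhile, hsplit]) hpw'
          (by
            intro j hj p hp
            rcases List.mem_append.mp hp with hp | hp
            · calc bKeyP p < bX (PySem.List.pyGetD lug i []) := hact i (by simp) p hp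
                _ ≤ bX (PySem.List.pyGetD lug j []) := hi j hj
            · calc bKeyP p < bX (PySem.List.pyGetD lug i []) := by
                    simpa using List.mem_takeWhile_imp hp
                _ ≤ bX (PySem.List.pyGetD lug j []) := hi j hj)]
    rw [htake]

-- read the dict built by inserting distinct fresh keys back
lemma getD_fold_insert (v : Int → Bool) :
    ∀ (ord : List Int), ord.Nodup → ∀ i ∈ ord,
    (ord.foldl (fun (d : PySem.Dict Int Bool) i => d.insert i (v i)) PySem.Dict.empty).getD i false = v i := by
  intro ord hnd i hi
  have hitems := PySem.Dict.items_foldl_insert_fresh ord (fun i => i) v PySem.Dict.empty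
    (fun a _ => PySem.Dict.contains_empty a) (by simpa using hnd)
  have hmem : (i, v i) ∈ (ord.foldl (fun (d : PySem.Dict Int Bool) i => d.insert i (v i)) PySem.Dict.empty).items := by
    rw [hitems]
    have : (PySem.Dict.empty : PySem.Dict Int Bool).items = [] := rfl
    simp only [this, List.nil_append, List.mem_map]
    exact ⟨i, hi, rfl⟩
  have hkeys := PySem.Dict.nodup_keys_foldl_insert ord (fun _ i => v i) PySem.Dict.empty
    (by simp [PySem.Dict.keys_empty])
  exact PySem.Dict.getD_of_mem_items _ hmem hkeys false

-- the final comprehension over enumerate is a plain filter of the luggage list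
lemma enumerate_filter_map {α : Type} (q : Int → Bool) (p : α → Bool) :
    ∀ (l : List α) (s : Int), (∀ il ∈ PySem.List.enumerate l s, q il.1 = p il.2) →
    ((PySem.List.enumerate l s).filter (fun il => q il.1)).map (fun il => il.2) = l.filter p := by
  intro l
  induction l with
  | nil => intro s _; rfl
  | cons x t ih =>
    intro s h
    rw [PySem.List.enumerate_cons]
    simp only [List.filter_cons, h (s, x) (by rw [PySem.List.enumerate_cons]; simp)]
    cases hx : p x <;>
      simp [hx, ih (s + 1) (fun il hil => h il (by rw [PySem.List.enumerate_cons]; simp [hil]))]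

-- A's append loop is a filter
lemma foldl_abandoned (ps : List (List Int)) (lug : List (List Int)) :
    lug.foldl
      (fun abandoned l =>
        let is_abandoned := !(ps.any (fun p => pyIntersects l p))
        if is_abandoned then abandoned ++ [l] else abandoned)
      []
    = lug.filter (fun l => !(ps.any (fun p => pyIntersects l p))) := by
  have hfold := PySem.List.foldl_append_if
    (fun l : List Int => !(ps.any (fun p => pyIntersects l p)))
    (id : List Int → List Int) lug ([] : List (List Int))
  simp only [id, List.map_id] at hfold
  simpa using hfold

-- ===== VERDICT (by name: the statement is the Claim_ definition above) =====
theorem detect_abandoned_luggage_spec : Claim_equal_detect_abandoned_luggage := by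
  intro bboxes confidences class_ids _hdom hpre
  obtain ⟨hover, hboth, hnop, hnol⟩ := hpre
  unfold Spec_detect_abandoned_luggage detect_abandoned_luggage detect_abandoned_luggage_alt
  have hP : selPersonsA bboxes class_ids 0 = (selRef bboxes class_ids).1 := by
    simpa using selPersonsA_eq class_ids [] bboxes hover
  have hL : selLuggageA bboxes class_ids 0 = (selRef bboxes class_ids).2 := by
    simpa using selLuggageA_eq class_ids [] bboxes hover
  simp only [hP, hL, zip_filter_persons, zip_filter_luggage]
  set persons := (selRef bboxes class_ids).1 with hpersons
  set lug := (selRef bboxes class_ids).2 with hlug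
  -- every selected box comes from a zip pair with the matching class id
  have hpair_person : ∀ p ∈ persons, ∃ bc ∈ bboxes.zip class_ids, bc.1 = p ∧ bc.2 = 0 := by
    intro p hp
    rw [hpersons, ← zip_filter_persons] at hp
    obtain ⟨bc, hbc, rfl⟩ := List.mem_map.mp hp
    have := List.mem_filter.mp hbc
    exact ⟨bc, this.1, rfl, by simpa using this.2⟩
  have hpair_lug : ∀ l ∈ lug, ∃ bc ∈ bboxes.zip class_ids, bc.1 = l ∧ (bc.2 = 24 ∨ bc.2 = 26 ∨ bc.2 = 28) := by
    intro l hl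
    rw [hlug, ← zip_filter_luggage] at hl
    obtain ⟨bc, hbc, rfl⟩ := List.mem_map.mp hl
    have := List.mem_filter.mp hbc
    refine ⟨bc, this.1, rfl, ?_⟩
    have := this.2
    simp only [Bool.or_eq_true, beq_iff_eq] at this
    tauto
  rw [foldl_abandoned]
  -- name the sweep's pieces
  set psorted := PySem.List.sorted persons bKeyP with hpsorted
  set order := PySem.List.sorted (PySem.List.pyRange 0 lug.length)
      (fun i => bX (PySem.List.pyGetD lug i [])) with horder
  have hsweep := sweep_dict lug psorted order [] psorted PySem.Dict.empty
    (by simp)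
    (by simpa using PySem.List.sorted_pairwise (PySem.List.pyRange 0 lug.length)
          (fun i => bX (PySem.List.pyGetD lug i [])))
    (by intro i _ p hp; exact absurd hp (List.not_mem_nil))
  rw [hsweep]
  have hordnd : order.Nodup :=
    ((PySem.List.sorted_perm (PySem.List.pyRange 0 lug.length)
        (fun i => bX (PySem.List.pyGetD lug i [])) false).symm).nodup
      (PySem.List.nodup_pyRange_one 0 lug.length)
  set dfin := order.foldl (fun d i => d.insert i
      ((psorted.takeWhile (fun p => decide (bKeyP p < bX (PySem.List.pyGetD lug i [])))).any
        (bCond (PySem.List.pyGetD lug i [])))) PySem.Dict.empty with hdfin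
  symm
  apply enumerate_filter_map (q := fun i => !(dfin.getD i false))
    (p := fun l => !(persons.any fun p => pyIntersects l p))
  intro il hil
  obtain ⟨k, hk, rfl⟩ := (PySem.List.mem_enumerate_iff lug 0 il).mp hil
  simp only [Int.zero_add]
  have hgetd : PySem.List.pyGetD lug (k : Int) [] = lug[k] := by
    rw [PySem.List.pyGetD_natCast, List.getD_eq_getElem lug [] hk]
  have hmemord : (k : Int) ∈ order := by
    rw [horder, PySem.List.mem_sorted, PySem.List.mem_pyRange_one]
    exact ⟨Int.natCast_nonneg k, by exact_mod_cast hk⟩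
  rw [hdfin, getD_fold_insert _ order hordnd (k : Int) hmemord, hgetd]
  -- the per-luggage value of the sweep equals A's person scan
  have hx : lug[k] ∈ lug := List.getElem_mem hk
  have hany : psorted.any (fun p => pyIntersects lug[k] p)
      = (psorted.takeWhile (fun p => decide (bKeyP p < bX lug[k]))).any (bCond lug[k]) := by
    by_cases hper : persons = []
    · have hps : psorted = [] := by
        rw [hpsorted]; exact (PySem.List.sorted_eq_nil_iff persons bKeyP false).mpr hper
      simp [hps]
    · -- persons and luggage both present: Pre_'s 4-length clause applies
      have hEp : ∃ p ∈ bboxes.zip class_ids, p.2 = 0 := by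
        obtain ⟨p, hp⟩ := List.exists_mem_of_ne_nil persons hper
        obtain ⟨bc, hbc, _, hc⟩ := hpair_person p hp
        exact ⟨bc, hbc, hc⟩
      have hEl : ∃ p ∈ bboxes.zip class_ids, p.2 = 24 ∨ p.2 = 26 ∨ p.2 = 28 := by
        obtain ⟨bc, hbc, _, hc⟩ := hpair_lug lug[k] hx
        exact ⟨bc, hbc, hc⟩
      have hlen4 := hboth ⟨hEp, hEl⟩
      apply any_takeWhile_lt bKeyP (bX lug[k]) _ (bCond lug[k]) psorted
        (PySem.List.sorted_pairwise persons bKeyP)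
      intro p hp
      refine intersects_split lug[k] p ?_ ?_
      · obtain ⟨bc, hbc, hfst, hc⟩ := hpair_lug lug[k] hx
        rw [← hfst]; exact hlen4 bc hbc (Or.inr hc)
      · obtain ⟨bc, hbc, hfst, hc⟩ :=
          hpair_person p ((PySem.List.mem_sorted persons bKeyP false p).mp hp)
        rw [← hfst]; exact hlen4 bc hbc (Or.inl hc)
  have hperm : persons.any (fun p => pyIntersects lug[k] p)
      = psorted.any (fun p => pyIntersects lug[k] p) :=
    (List.Perm.any_eq (PySem.List.sorted_perm persons bKeyP false)).symm
  rw [← hany, ← hperm]
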